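-- pv_equiv track=rewrite | github.com/ncalavera/improv_ucb | src/chapter_formatter.py | _join_with_hyphen_handling
-- ===== SOURCE A (Python) =====
-- from typing import Dict, Iterable, List, Optional
--
-- def _join_with_hyphen_handling(parts: List[str]) -> str:
--     text = ""
--     for chunk in parts:
--         chunk = chunk.strip()
--         if not chunk:
--             continue
--         if text.endswith("-"):
--             text = text + chunk
--         else:
--             if text:
--                 text += " "
--             text += chunk
--     return text.strip()
-- ===== SOURCE B (Python) =====
-- from typing import List
--
--
-- def _join_with_hyphen_handling(parts: List[str]) -> str:
--     chunks = [c for c in map(str.strip, parts) if c]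
--     if not chunks:
--         return ""
--     # separator table: glue after each chunk except the last ("" after a hyphen, " " otherwise)
--     glue = ["" if c.endswith("-") else " " for c in chunks[:-1]]
--     return "".join(c + g for c, g in zip(chunks, glue)) + chunks[-1]
-- ===== Notes on version B (the rewrite author's own statement) =====
-- stated objective: alternative
-- what changed: Replaces A's forward loop with a string accumulator (separator decided by whether the accumulated text ends in '-') by a staged computation: strip-and-filter the chunks, precompute a separator table from each chunk's own ending, and emit the result with one zip-and-join; correct because after stripping each non-empty chunk the accumulated text always ends with the previous chunk's last character.
import Mathlib
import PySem

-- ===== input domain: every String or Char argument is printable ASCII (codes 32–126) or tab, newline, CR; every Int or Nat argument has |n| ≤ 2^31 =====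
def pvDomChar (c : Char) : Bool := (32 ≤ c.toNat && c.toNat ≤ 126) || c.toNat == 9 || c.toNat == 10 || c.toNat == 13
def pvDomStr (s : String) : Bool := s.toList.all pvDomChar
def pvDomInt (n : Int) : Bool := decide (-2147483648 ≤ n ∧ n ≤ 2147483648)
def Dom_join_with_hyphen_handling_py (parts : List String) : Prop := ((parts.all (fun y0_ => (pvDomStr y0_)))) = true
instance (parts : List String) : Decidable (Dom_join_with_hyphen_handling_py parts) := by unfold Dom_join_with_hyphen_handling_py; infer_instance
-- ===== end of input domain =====

-- B replaces A's forward accumulator loop (separator decided by the accumulated text's ending)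
-- by a staged pipeline: strip-and-filter, precompute a separator table from each chunk's own
-- ending, then one zip-and-join — an alternative decomposition, same cost.

-- ===== PORT A =====
-- loop body of A's for-loop (strip, skip empties, hyphen-append or space-append)
def pvBodyA (text : String) (chunk0 : String) : String :=
  let chunk := PySem.Str.strip chunk0
  if chunk = "" then text
  else if PySem.Str.endswith text "-" then text ++ chunk
  else if text ≠ "" then text ++ " " ++ chunk
  else text ++ chunk

def join_with_hyphen_handling_py (parts : List String) : String :=
  PySem.Str.strip (parts.foldl pvBodyA "")

-- ===== PORT B =====
def join_with_hyphen_handling_py_alt (parts : List String) : String :=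
  let chunks := (parts.map PySem.Str.strip).filter (fun c => c ≠ "")
  match chunks.getLast? with
  | none => ""                                     -- "if not chunks: return ''"
  | some last =>
    -- glue = ["" if c.endswith("-") else " " for c in chunks[:-1]]
    let glue := chunks.dropLast.map (fun c => if PySem.Str.endswith c "-" then "" else " ")
    -- "".join(c + g for c, g in zip(chunks, glue)) + chunks[-1]
    PySem.Str.join "" (List.zipWith (fun c g => c ++ g) chunks glue) ++ last

-- ===== PRECONDITION & SPEC =====
def Spec_join_with_hyphen_handling_py (parts : List String) (out : String) : Prop := out = join_with_hyphen_handling_py_alt parts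
instance (parts : List String) (out : String) : Decidable (Spec_join_with_hyphen_handling_py parts out) := by unfold Spec_join_with_hyphen_handling_py; infer_instance

-- ===== CLAIM (what is proved, stated in full; the proofs are below) =====
def Claim_equal_join_with_hyphen_handling_py : Prop := ∀ (parts : List String), Dom_join_with_hyphen_handling_py parts → Spec_join_with_hyphen_handling_py parts (join_with_hyphen_handling_py parts)

-- ===== LEMMAS AND PROOFS =====

-- char-level mirror of A's loop body on already-stripped non-empty chunks
def pvStepA (t c : List Char) : List Char :=
  if PySem.Chars.endswith t ['-'] then t ++ c else if t ≠ [] then t ++ [' '] ++ c else t ++ c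

-- char-level separator table entry
def pvSepC (c : List Char) : List Char :=
  if PySem.Chars.endswith c ['-'] then [] else [' ']

-- char-level mirror of B's pipeline
def pvBC (chunks : List (List Char)) : List Char :=
  match chunks.getLast? with
  | none => []
  | some l =>
    (List.zipWith (fun c g => c ++ g) chunks (chunks.dropLast.map pvSepC)).flatten ++ l

-- A's loop body once the empty-chunk skip has been factored into the filter (string level)
def pvGA (text c : String) : String :=
  if PySem.Str.endswith text "-" then text ++ c
  else if text ≠ "" then text ++ " " ++ c
  else text ++ c

lemma pv_head_dropWhile {l : List Char} {c : Char} {p : Char → Bool}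
    (h : (l.dropWhile p).head? = some c) : p c = false := by
  induction l with
  | nil => simp [List.dropWhile] at h
  | cons a l ih =>
    rw [List.dropWhile] at h
    cases hp : p a with
    | false => rw [hp] at h; simp at h; exact h ▸ hp
    | true => rw [hp] at h; exact ih h

lemma pv_length_rstrip_le (l : List Char) :
    (PySem.Chars.rstrip l).length ≤ l.length := by
  simp [PySem.Chars.rstrip]
  simpa using List.length_dropWhile_le PySem.Chars.isspace l.reverse

lemma pv_strip_eq_self {cs : List Char}
    (hh : ∀ c, cs.head? = some c → PySem.Chars.isspace c = false)
    (hl : ∀ c, cs.getLast? = some c → PySem.Chars.isspace c = false) :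
    PySem.Chars.strip cs = cs := by
  have h1 : PySem.Chars.lstrip cs = cs := by
    unfold PySem.Chars.lstrip
    cases cs with
    | nil => rfl
    | cons a l =>
      have := hh a rfl
      simp [List.dropWhile, this]
  rw [PySem.Chars.strip, h1]
  unfold PySem.Chars.rstrip
  have h2 : List.dropWhile PySem.Chars.isspace cs.reverse = cs.reverse := by
    cases hr : cs.reverse with
    | nil => rfl
    | cons a m =>
      have ha : cs.getLast? = some a := by
        rw [← List.head?_reverse, hr]; rfl
      simp [List.dropWhile, hl a ha]
  rw [h2, List.reverse_reverse]

lemma pv_head_not_ws {cs : List Char} {c : Char}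
    (h : PySem.Chars.strip cs = cs) (hc : cs.head? = some c) :
    PySem.Chars.isspace c = false := by
  by_cases hw : PySem.Chars.isspace c = true
  · exfalso
    cases cs with
    | nil => simp at hc
    | cons a l =>
      have ha : a = c := by simpa using hc
      subst ha
      have hls : PySem.Chars.lstrip (a :: l) = List.dropWhile PySem.Chars.isspace l := by
        simp [PySem.Chars.lstrip, List.dropWhile, hw]
      have hlen : (PySem.Chars.strip (a :: l)).length ≤ l.length := by
        rw [PySem.Chars.strip, hls]
        exact le_trans (pv_length_rstrip_le _) (List.length_dropWhile_le _ _)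
      rw [h] at hlen
      simp at hlen
  · simpa using hw

lemma pv_last_not_ws {cs : List Char} {c : Char}
    (h : PySem.Chars.strip cs = cs) (hc : cs.getLast? = some c) :
    PySem.Chars.isspace c = false := by
  by_cases hw : PySem.Chars.isspace c = true
  · exfalso
    obtain ⟨m, rfl⟩ := List.getLast?_eq_some_iff.mp hc
    rcases List.dropWhile_suffix (l := m ++ [c]) PySem.Chars.isspace with ⟨pre, hpre⟩
    cases he : List.dropWhile PySem.Chars.isspace (m ++ [c]) with
    | nil =>
      have : PySem.Chars.strip (m ++ [c]) = [] := by
        rw [PySem.Chars.strip, PySem.Chars.lstrip, he]; rfl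
      rw [h] at this
      simp at this
    | cons b l =>
      have hsuf : (List.dropWhile PySem.Chars.isspace (m ++ [c])).getLast? = some c := by
        cases hx : (List.dropWhile PySem.Chars.isspace (m ++ [c])).getLast? with
        | none => rw [he] at hx; simp at hx
        | some x =>
          have h2 : (pre ++ List.dropWhile PySem.Chars.isspace (m ++ [c])).getLast? = some c := by
            rw [hpre]; exact hc
          rw [List.getLast?_append, hx] at h2
          simp at h2
          rw [h2]
      obtain ⟨m', hm'⟩ := List.getLast?_eq_some_iff.mp hsuf
      have hL : (List.dropWhile PySem.Chars.isspace (m ++ [c])).length = m'.length + 1 := by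
        rw [hm']; simp
      have hP : pre.length + (m'.length + 1) = m.length + 1 := by
        have h3 := congrArg List.length hpre
        rw [List.length_append, hL] at h3
        simpa using h3
      have hlen1 : (PySem.Chars.strip (m ++ [c])).length ≤ m'.length := by
        rw [PySem.Chars.strip, PySem.Chars.lstrip, hm']
        unfold PySem.Chars.rstrip
        have hrv : (m' ++ [c]).reverse = c :: m'.reverse := by simp
        rw [hrv]
        simp [List.dropWhile, hw]
        simpa using List.length_dropWhile_le PySem.Chars.isspace m'.reverse
      rw [h] at hlen1
      simp at hlen1
      omega
  · simpa using hw

lemma pv_rstrip_prefix (l : List Char) : PySem.Chars.rstrip l <+: l := by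
  unfold PySem.Chars.rstrip
  obtain ⟨t, ht⟩ := List.dropWhile_suffix (l := l.reverse) PySem.Chars.isspace
  exact ⟨t.reverse, by rw [← List.reverse_append, ht, List.reverse_reverse]⟩

lemma pv_strip_idem (cs : List Char) :
    PySem.Chars.strip (PySem.Chars.strip cs) = PySem.Chars.strip cs := by
  apply pv_strip_eq_self
  · intro c hc
    have hpre : PySem.Chars.strip cs <+: PySem.Chars.lstrip cs := by
      rw [PySem.Chars.strip]; exact pv_rstrip_prefix _
    obtain ⟨t, ht⟩ := hpre
    have : (PySem.Chars.lstrip cs).head? = some c := by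
      rw [← ht, List.head?_append]
      cases hgl : (PySem.Chars.strip cs).head? with
      | none => rw [hc] at hgl; exact absurd hgl (by simp)
      | some x => rw [hc] at hgl; simp at hgl; simp [hgl]
    exact pv_head_dropWhile (by simpa [PySem.Chars.lstrip] using this)
  · intro c hc
    have : (List.dropWhile PySem.Chars.isspace (PySem.Chars.lstrip cs).reverse).head? = some c := by
      have h1 : PySem.Chars.strip cs =
          (List.dropWhile PySem.Chars.isspace (PySem.Chars.lstrip cs).reverse).reverse := by
        rw [PySem.Chars.strip]; rfl
      rw [h1, List.getLast?_reverse] at hc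
      exact hc
    exact pv_head_dropWhile this

-- endswith depends only on the last character
lemma pv_endswith_congr {cs ds : List Char} (h : cs.getLast? = ds.getLast?) (x : Char) :
    PySem.Chars.endswith cs [x] = PySem.Chars.endswith ds [x] := by
  have hiff : ∀ l : List Char, (PySem.Chars.endswith l [x] = true ↔ l.getLast? = some x) := by
    intro l
    rw [PySem.Chars.endswith_iff]
    constructor
    · rintro ⟨tl, rfl⟩; exact List.getLast?_concat
    · intro hl
      obtain ⟨ys, rfl⟩ := List.getLast?_eq_some_iff.mp hl
      exact ⟨ys, rfl⟩
  cases he : PySem.Chars.endswith ds [x] with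
  | true => exact (hiff cs).mpr (by rw [h]; exact (hiff ds).mp he)
  | false =>
    cases he2 : PySem.Chars.endswith cs [x] with
    | false => rfl
    | true =>
      exfalso
      have h1 := (hiff cs).mp he2
      rw [h] at h1
      rw [(hiff ds).mpr h1] at he
      simp at he

-- A's step on a non-empty accumulator, written with the separator table entry
lemma pv_stepA_eq (t c : List Char) (ht : t ≠ []) :
    pvStepA t c = t ++ pvSepC t ++ c := by
  rw [pvStepA, pvSepC]
  by_cases hd : PySem.Chars.endswith t ['-'] = true
  · simp [hd]
  · simp [hd, ht]

-- a common prefix in front of a non-empty accumulator factors out of A's loop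
lemma pv_shift : ∀ (cs : List (List Char)) (x a : List Char), a ≠ [] →
    (∀ u ∈ cs, u ≠ []) → cs.foldl pvStepA (x ++ a) = x ++ cs.foldl pvStepA a := by
  intro cs
  induction cs with
  | nil => intro x a _ _; rfl
  | cons c cs ih =>
    intro x a ha hmem
    have hc : c ≠ [] := hmem c (by simp)
    have hE : PySem.Chars.endswith (x ++ a) ['-'] = PySem.Chars.endswith a ['-'] := by
      apply pv_endswith_congr
      rw [List.getLast?_append]
      cases hgl : a.getLast? with
      | none => exact absurd (List.getLast?_eq_none_iff.mp hgl) ha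
      | some y => rfl
    have hstep : pvStepA (x ++ a) c = x ++ pvStepA a c := by
      rw [pv_stepA_eq _ _ (by simp [ha]), pv_stepA_eq _ _ ha, pvSepC, pvSepC, hE]
      simp
    simp only [List.foldl_cons, hstep]
    exact ih x (pvStepA a c) (by rw [pv_stepA_eq _ _ ha]; simp [hc])
      (fun u hu => hmem u (by simp [hu]))

-- B's pipeline on a cons, unfolded one chunk
lemma pv_BC_cons (c d : List Char) (rest : List (List Char)) :
    pvBC (c :: d :: rest) = c ++ pvSepC c ++ pvBC (d :: rest) := by
  rw [pvBC, pvBC]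
  have h1 : (c :: d :: rest).getLast? = (d :: rest).getLast? := by
    rw [List.getLast?_cons_cons]
  rw [h1]
  cases hgl : (d :: rest).getLast? with
  | none => simp at hgl
  | some l =>
    have h2 : (c :: d :: rest).dropLast = c :: (d :: rest).dropLast := rfl
    rw [h2]
    simp only [List.map_cons, List.zipWith_cons_cons, List.flatten_cons]
    simp

-- A's loop over non-empty chunks equals B's pipeline
lemma pv_main : ∀ (cs : List (List Char)) (c : List Char), c ≠ [] →
    (∀ u ∈ cs, u ≠ []) → cs.foldl pvStepA c = pvBC (c :: cs) := by
  intro cs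
  induction cs with
  | nil =>
    intro c _ _
    simp [pvBC]
  | cons d rest ih =>
    intro c hc hmem
    have hd : d ≠ [] := hmem d (by simp)
    simp only [List.foldl_cons]
    rw [pv_stepA_eq _ _ hc, pv_shift rest (c ++ pvSepC c) d hd
      (fun u hu => hmem u (by simp [hu]))]
    rw [ih d hd (fun u hu => hmem u (by simp [hu])), pv_BC_cons]

def pvTokOk (u : List Char) : Prop := PySem.Chars.strip u = u ∧ u ≠ []

-- head/last characters of B's pipeline come from the first/last chunk
lemma pv_BC_head (c : List Char) (cs : List (List Char)) (hc : c ≠ []) :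
    (pvBC (c :: cs)).head? = c.head? := by
  cases cs with
  | nil => simp [pvBC]
  | cons d rest =>
    rw [pv_BC_cons]
    rw [List.append_assoc, List.head?_append]
    cases hgl : c.head? with
    | none => exact absurd (by simpa using hgl) hc
    | some y => simp

lemma pv_BC_last : ∀ (cs : List (List Char)) (c t : List Char),
    (c :: cs).getLast? = some t → t ≠ [] → (pvBC (c :: cs)).getLast? = t.getLast? := by
  intro cs
  induction cs with
  | nil =>
    intro c t h ht
    simp at h
    subst h
    simp [pvBC]
  | cons d rest ih =>
    intro c t h ht
    rw [List.getLast?_cons_cons] at h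
    rw [pv_BC_cons, List.append_assoc, List.getLast?_append]
    have := ih d t h ht
    rw [List.getLast?_append, this]
    cases hgl : t.getLast? with
    | none => exact absurd (List.getLast?_eq_none_iff.mp hgl) ht
    | some y => rfl

-- B's pipeline output is already stripped when every chunk is
lemma pv_strip_BC (c : List Char) (cs : List (List Char))
    (hinv : ∀ u ∈ c :: cs, pvTokOk u) :
    PySem.Chars.strip (pvBC (c :: cs)) = pvBC (c :: cs) := by
  have hc := hinv c (by simp)
  apply pv_strip_eq_self
  · intro x hx
    rw [pv_BC_head c cs hc.2] at hx
    exact pv_head_not_ws hc.1 hx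
  · intro x hx
    have hsome : ∃ t, (c :: cs).getLast? = some t := by
      cases hgl : (c :: cs).getLast? with
      | none => simp at hgl
      | some t => exact ⟨t, rfl⟩
    obtain ⟨t, hgl⟩ := hsome
    have htok := hinv t (List.mem_of_getLast? hgl)
    rw [pv_BC_last cs c t hgl htok.2] at hx
    exact pv_last_not_ws htok.1 hx

-- ---- bridging the string-level ports to the char-level mirrors ----

lemma pv_foldA_filter : ∀ (parts : List String) (text : String),
    parts.foldl pvBodyA text =
      ((parts.map PySem.Str.strip).filter (fun c => c ≠ "")).foldl pvGA text := by
  intro parts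
  induction parts with
  | nil => intro text; rfl
  | cons p ps ih =>
    intro text
    simp only [List.foldl_cons, List.map_cons, List.filter_cons]
    by_cases hp : PySem.Str.strip p = ""
    · have h1 : pvBodyA text p = text := by simp [pvBodyA, hp]
      rw [h1, ih]
      simp [hp]
    · have h1 : pvBodyA text p = pvGA text (PySem.Str.strip p) := by
        simp [pvBodyA, pvGA, hp]
      rw [h1, ih]
      simp [hp]

lemma pv_GA_toList (t c : String) : (pvGA t c).toList = pvStepA t.toList c.toList := by
  rw [pvGA, pvStepA]
  rw [show PySem.Str.endswith t "-" = PySem.Chars.endswith t.toList ['-'] from PySem.Str.endswith_eq t "-"]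
  by_cases h : PySem.Chars.endswith t.toList ['-'] = true
  · rw [if_pos h, if_pos h, String.toList_append]
  · rw [if_neg h, if_neg h]
    by_cases h2 : t = ""
    · rw [if_neg (by simp [h2]), if_neg (by simp [h2]), String.toList_append]
    · have h3 : t.toList ≠ [] := by simpa [String.toList_eq_nil_iff] using h2
      rw [if_pos h2, if_pos h3, String.toList_append, String.toList_append]
      rfl

lemma pv_bridgeA : ∀ (cs : List String) (t : String),
    (cs.foldl pvGA t).toList = (cs.map String.toList).foldl pvStepA t.toList := by
  intro cs
  induction cs with
  | nil => intro t; rfl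
  | cons c cs ih =>
    intro t
    simp only [List.foldl_cons, List.map_cons]
    rw [ih, pv_GA_toList]

lemma pv_cleaned_toList : ∀ (parts : List String),
    ((parts.map PySem.Str.strip).filter (fun c => c ≠ "")).map String.toList
      = ((parts.map String.toList).map PySem.Chars.strip).filter (fun c => c ≠ []) := by
  intro parts
  induction parts with
  | nil => rfl
  | cons p ps ih =>
    simp only [List.map_cons, List.filter_cons]
    by_cases hp : PySem.Str.strip p = ""
    · have h1 : PySem.Chars.strip p.toList = [] := by
        rw [← PySem.Str.toList_strip, hp]; rfl
      rw [if_neg (by simp [hp]), if_neg (by simp [h1])]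
      exact ih
    · have h1 : PySem.Chars.strip p.toList ≠ [] := by
        rw [← PySem.Str.toList_strip]
        intro he
        exact hp (by rwa [String.toList_eq_nil_iff] at he)
      rw [if_pos (by simp [hp]), if_pos (by simp [h1])]
      rw [List.map_cons, PySem.Str.toList_strip, ih]

lemma pv_cleaned_ok : ∀ (parts : List String),
    ∀ x ∈ ((parts.map String.toList).map PySem.Chars.strip).filter (fun c => c ≠ []), pvTokOk x := by
  intro parts x hx
  rw [List.mem_filter] at hx
  obtain ⟨hmem, hne⟩ := hx
  obtain ⟨y, _, rfl⟩ := List.mem_map.mp hmem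
  exact ⟨pv_strip_idem y, by simpa using hne⟩

-- ''.join is flatten at the char level
lemma pv_join_nil_flatten : ∀ (ts : List (List Char)),
    PySem.Chars.join [] ts = ts.flatten := by
  intro ts
  induction ts with
  | nil => rfl
  | cons a l ih =>
    cases l with
    | nil => simp [PySem.Chars.join_singleton]
    | cons b m =>
      rw [PySem.Chars.join_cons_cons, ih]
      simp

-- B's string-level port computes the char-level pipeline
lemma pv_alt_toList (parts : List String) :
    (join_with_hyphen_handling_py_alt parts).toList =
      pvBC (((parts.map PySem.Str.strip).filter (fun c => c ≠ "")).map String.toList) := by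
  rw [join_with_hyphen_handling_py_alt, pvBC]
  set chunks := (parts.map PySem.Str.strip).filter (fun c => c ≠ "") with hch
  rw [List.getLast?_map]
  cases hgl : chunks.getLast? with
  | none => rfl
  | some l =>
    simp only [Option.map_some]
    rw [String.toList_append, PySem.Str.toList_join,
        show ("" : String).toList = ([] : List Char) from rfl, pv_join_nil_flatten]
    have hz : ∀ (xs ys : List String),
        (List.zipWith (fun c g => c ++ g) xs ys).map String.toList
          = List.zipWith (fun c g => c ++ g) (xs.map String.toList) (ys.map String.toList) := by
      intro xs
      induction xs with
      | nil => intro ys; rfl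
      | cons x xs ih =>
        intro ys
        cases ys with
        | nil => rfl
        | cons y ys => simp [ih]
    have hm : ∀ (xs : List String),
        (xs.map (fun c => if PySem.Str.endswith c "-" then "" else " ")).map String.toList
          = (xs.map String.toList).map pvSepC := by
      intro xs
      induction xs with
      | nil => rfl
      | cons x xs ih =>
        simp only [List.map_cons, ih]
        congr 1
        rw [pvSepC, show PySem.Str.endswith x "-" = PySem.Chars.endswith x.toList ['-']
          from PySem.Str.endswith_eq x "-"]
        by_cases h : PySem.Chars.endswith x.toList ['-'] = true <;> simp [h]
    have hglue : (chunks.dropLast.map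
          (fun c => if PySem.Str.endswith c "-" then "" else " ")).map String.toList
        = (chunks.map String.toList).dropLast.map pvSepC := by
      rw [hm, List.map_dropLast]
    congr 1
    rw [hz, hglue]

-- ===== VERDICT (by name: the statement is the Claim_ definition above) =====
theorem join_with_hyphen_handling_py_spec : Claim_equal_join_with_hyphen_handling_py := by
  intro parts _
  unfold Spec_join_with_hyphen_handling_py
  apply String.ext
  rw [pv_alt_toList, pv_cleaned_toList]
  rw [join_with_hyphen_handling_py, PySem.Str.toList_strip]
  rw [pv_foldA_filter, pv_bridgeA, pv_cleaned_toList]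
  rw [show ("" : String).toList = ([] : List Char) from rfl]
  have hok := pv_cleaned_ok parts
  cases hcc : ((parts.map String.toList).map PySem.Chars.strip).filter (fun c => c ≠ []) with
  | nil => rfl
  | cons c cs =>
    rw [hcc] at hok
    have hc := hok c (by simp)
    simp only [List.foldl_cons]
    have hA0 : pvStepA [] c = c := by
      rw [pvStepA]
      have : PySem.Chars.endswith ([] : List Char) ['-'] = false := rfl
      simp [this]
    rw [hA0]
    rw [pv_main cs c hc.2 (fun u hu => (hok u (by simp [hu])).2)]
    exact pv_strip_BC c cs hok
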